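-- pv_equiv track=rewrite | github.com/luisgc93/ds_and_algorithms | algorithms/poker_hands.py | value_of_highest_card_outside_of_pair
-- ===== SOURCE A (Python) =====
-- from collections import Counter
-- from typing import List
--
-- CARD_TO_SCORE = {
--     "1": 1,
--     "2": 2,
--     "3": 3,
--     "4": 4,
--     "5": 5,
--     "6": 6,
--     "7": 7,
--     "8": 8,
--     "9": 9,
--     "T": 10,
--     "J": 11,
--     "Q": 12,
--     "K": 13,
--     "A": 14,
-- }
--
-- def value_of_highest_card_outside_of_pair(hand_values: List[str]) -> int:
--     highest_card_in_pair = highest_value_in_pair(hand_values)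
--     highest_card_value = 0
--     for card in hand_values:
--         score = CARD_TO_SCORE[card]
--         if score > highest_card_value and score != highest_card_in_pair:
--             highest_card_value = score
--     return highest_card_value
--
-- def highest_value_in_pair(values: List[str]) -> int:
--     if number_of_pairs(values) == 0:
--         raise ValueError("No pair found")
--     repeated = (Counter(values) - Counter(set(values))).keys()
--     highest = 0
--     for card in repeated:
--         if CARD_TO_SCORE[card] > highest:
--             highest = CARD_TO_SCORE[card]
--     return highest
--
-- def number_of_pairs(values: List[str]) -> int:
--     count = Counter(values) - Counter(set(values))
--     pairs = 0
--     for i in count: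
--         if count[i] == 1:
--             pairs += 1
--     return pairs
-- ===== SOURCE B (Python) =====
-- from collections import Counter
-- from typing import List
--
-- CARD_TO_SCORE = {
--     "1": 1, "2": 2, "3": 3, "4": 4, "5": 5, "6": 6, "7": 7, "8": 8,
--     "9": 9, "T": 10, "J": 11, "Q": 12, "K": 13, "A": 14,
-- }
--
-- def value_of_highest_card_outside_of_pair(hand_values: List[str]) -> int:
--     # a pair = some value occurring exactly twice (checked before any score lookup)
--     if 2 not in Counter(hand_values).values():
--         raise ValueError("No pair found")
--     scores = sorted((CARD_TO_SCORE[c] for c in hand_values), reverse=True)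
--     # largest score occurring at least twice = first adjacent duplicate in the
--     # descending-sorted scores
--     pair_value = 0
--     for i in range(len(scores) - 1):
--         if scores[i] == scores[i + 1]:
--             pair_value = scores[i]
--             break
--     # highest score outside the pair = first sorted score differing from it
--     for s in scores:
--         if s != pair_value:
--             return s
--     return 0
-- ===== Notes on version B (the rewrite author's own statement) =====
-- stated objective: alternative
-- what changed: Replaces A's Counter-subtraction helpers and three max-scan loops with a single sort of the scores: the pair value is the first adjacent duplicate in the descending-sorted scores and the answer is the first sorted score differing from it.
import Mathlib
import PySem

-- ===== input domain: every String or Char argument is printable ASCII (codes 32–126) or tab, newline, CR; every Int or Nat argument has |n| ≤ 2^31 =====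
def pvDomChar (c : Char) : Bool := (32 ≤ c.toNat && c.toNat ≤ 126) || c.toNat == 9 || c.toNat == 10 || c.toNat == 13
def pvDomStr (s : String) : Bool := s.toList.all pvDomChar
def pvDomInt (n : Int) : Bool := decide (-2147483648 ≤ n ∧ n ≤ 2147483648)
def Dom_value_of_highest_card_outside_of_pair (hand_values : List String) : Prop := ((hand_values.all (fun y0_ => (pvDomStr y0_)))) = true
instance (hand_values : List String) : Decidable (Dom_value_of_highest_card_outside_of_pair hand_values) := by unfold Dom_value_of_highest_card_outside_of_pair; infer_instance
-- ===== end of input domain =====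

-- B replaces A's Counter-subtraction helpers and three max-scans by one descending sort of
-- the scores scanned for the first adjacent duplicate (alternative decomposition, same cost class).

-- ===== PORT A =====
def CARD_TO_SCORE : PySem.Dict String Int :=
  PySem.Dict.ofList [("1",1),("2",2),("3",3),("4",4),("5",5),("6",6),("7",7),("8",8),
                     ("9",9),("T",10),("J",11),("Q",12),("K",13),("A",14)]

-- Counter(values) - Counter(set(values)): exact — the subtrahend counts every distinct key
-- once, and Counter.__sub__ keeps the positive differences in the minuend's key order.
def counterMinusSet (values : List String) : PySem.Dict String Int :=
  PySem.Dict.mk (((PySem.Dict.counter values).items.filter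
    (fun p => decide (0 < p.2 - 1))).map (fun p => (p.1, p.2 - 1)))

def number_of_pairs (values : List String) : Int :=
  let count := counterMinusSet values
  count.keys.foldl (fun pairs i => if count.getD i 0 = 1 then pairs + 1 else pairs) 0

def highest_value_in_pair (values : List String) : Int :=
  if number_of_pairs values = 0 then 0  -- Python: raise ValueError("No pair found"); excluded by Pre_
  else
    let repeated := (counterMinusSet values).keys
    repeated.foldl (fun highest card =>
      if CARD_TO_SCORE.getD card 0 > highest then CARD_TO_SCORE.getD card 0 else highest) 0

def value_of_highest_card_outside_of_pair (hand_values : List String) : Int :=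
  let highest_card_in_pair := highest_value_in_pair hand_values
  hand_values.foldl (fun highest_card_value card =>
    let score := CARD_TO_SCORE.getD card 0  -- CARD_TO_SCORE[card]: KeyError excluded by Pre_
    if score > highest_card_value ∧ score ≠ highest_card_in_pair then score
    else highest_card_value) 0

-- ===== PORT B =====
-- first adjacent duplicate in the list (B's indexed break loop over the sorted scores)
def firstAdjacentDup : List Int → Int
  | [] => 0
  | [_] => 0
  | x :: y :: rest => if x = y then x else firstAdjacentDup (y :: rest)

-- B's final loop: first element differing from p, else 0
def firstOtherThan : List Int → Int → Int
  | [], _ => 0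
  | s :: rest, p => if s ≠ p then s else firstOtherThan rest p

def value_of_highest_card_outside_of_pair_alt (hand_values : List String) : Int :=
  if ¬ ((PySem.Dict.counter hand_values).values.contains (2 : Int)) then 0
    -- Python: raise ValueError("No pair found"); excluded by Pre_
  else
    let scores := PySem.List.sorted (hand_values.map (fun c => CARD_TO_SCORE.getD c 0))
      (fun s => s) true
    let pair_value := firstAdjacentDup scores
    firstOtherThan scores pair_value

-- ===== PRECONDITION & SPEC =====
-- Pre_: every card is a valid key (else Python raises KeyError) and some card occurs
-- exactly twice (else Python raises ValueError); exactly the inputs where A returns.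
def Pre_value_of_highest_card_outside_of_pair (hand_values : List String) : Prop :=
  (∀ card ∈ hand_values, CARD_TO_SCORE.contains card = true) ∧
  (∃ card ∈ hand_values, hand_values.count card = 2)
instance (hand_values : List String) : Decidable (Pre_value_of_highest_card_outside_of_pair hand_values) := by unfold Pre_value_of_highest_card_outside_of_pair; infer_instance
def pvWitness_value_of_highest_card_outside_of_pair : List String := ["A", "K", "A", "7", "2"]

def Spec_value_of_highest_card_outside_of_pair (hand_values : List String) (out : Int) : Prop := out = value_of_highest_card_outside_of_pair_alt hand_values
instance (hand_values : List String) (out : Int) : Decidable (Spec_value_of_highest_card_outside_of_pair hand_values out) := by unfold Spec_value_of_highest_card_outside_of_pair; infer_instance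

-- ===== CLAIM (what is proved, stated in full; the proofs are below) =====
def Claim_equal_value_of_highest_card_outside_of_pair : Prop := ∀ (hand_values : List String), Dom_value_of_highest_card_outside_of_pair hand_values → Pre_value_of_highest_card_outside_of_pair hand_values → Spec_value_of_highest_card_outside_of_pair hand_values (value_of_highest_card_outside_of_pair hand_values)

-- ===== LEMMAS AND PROOFS =====
-- foundations on the card table
theorem cts_mem_keys_of_contains {c : String} (h : CARD_TO_SCORE.contains c = true) :
    c ∈ CARD_TO_SCORE.keys := by
  rw [PySem.Dict.contains_eq_decide_mem_keys] at h; exact of_decide_eq_true h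

theorem cts_score_pos : ∀ c ∈ CARD_TO_SCORE.keys, (1:Int) ≤ CARD_TO_SCORE.getD c 0 := by decide

theorem cts_score_inj : ∀ c ∈ CARD_TO_SCORE.keys, ∀ c' ∈ CARD_TO_SCORE.keys,
    CARD_TO_SCORE.getD c 0 = CARD_TO_SCORE.getD c' 0 → c = c' := by decide
-- count of a score in the mapped list equals count of the card (valid cards)
theorem count_map_score (hv : List String) (hvalid : ∀ c ∈ hv, CARD_TO_SCORE.contains c = true)
    {c : String} (hc : CARD_TO_SCORE.contains c = true) :
    (hv.map (fun x => CARD_TO_SCORE.getD x 0)).count (CARD_TO_SCORE.getD c 0) = hv.count c := by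
  induction hv with
  | nil => simp
  | cons x t ih =>
    have hx := hvalid x (by simp)
    have ht : ∀ c ∈ t, CARD_TO_SCORE.contains c = true := fun c hc => hvalid c (by simp [hc])
    have heq : (CARD_TO_SCORE.getD x 0 = CARD_TO_SCORE.getD c 0) ↔ (x = c) := by
      constructor
      · intro h; exact cts_score_inj x (cts_mem_keys_of_contains hx) c (cts_mem_keys_of_contains hc) h
      · intro h; rw [h]
    by_cases h : x = c
    · subst h; simp [ih ht]
    · simp [ih ht, h, heq.not]

-- foldl max spec
theorem foldl_max_spec (l : List Int) (a : Int) :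
    (l.foldl max a = a ∨ l.foldl max a ∈ l) := by
  induction l generalizing a with
  | nil => simp
  | cons x t ih =>
    simp only [List.foldl_cons]
    rcases ih (max a x) with h | h
    · rw [h]
      rcases max_choice a x with hm | hm <;> rw [hm]
      · exact Or.inl rfl
      · exact Or.inr (by simp)
    · exact Or.inr (by simp [h])

theorem fmax_nonneg (l : List Int) : 0 ≤ l.foldl max 0 := (PySem.List.le_foldl_max l 0).1

theorem fmax_congr {l l' : List Int} (h : ∀ x, x ∈ l ↔ x ∈ l') :
    l.foldl max 0 = l'.foldl max 0 := by
  have key : ∀ (u v : List Int), (∀ x, x ∈ u → x ∈ v) → u.foldl max 0 ≤ v.foldl max 0 := by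
    intro u v huv
    rcases foldl_max_spec u 0 with h0 | hm
    · rw [h0]; exact fmax_nonneg v
    · exact (PySem.List.le_foldl_max v 0).2 _ (huv _ hm)
  exact le_antisymm (key l l' (fun x => (h x).mp) ) (key l' l (fun x => (h x).mpr))
-- A's "if score > h then score else h" fold over cards is a max-fold over the mapped scores
theorem foldl_if_gt (l : List String) (a : Int) :
    l.foldl (fun h c => if CARD_TO_SCORE.getD c 0 > h then CARD_TO_SCORE.getD c 0 else h) a
      = (l.map (fun c => CARD_TO_SCORE.getD c 0)).foldl max a := by
  rw [List.foldl_map]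
  apply PySem.List.foldl_congr_mem
  intro acc x _
  by_cases h : CARD_TO_SCORE.getD x 0 ≤ acc
  · simp [h, not_lt.mpr h]
  · simp [h, le_of_lt (not_le.mp h)]

-- A's main fold = max-fold over the scores different from p
theorem foldl_if_ne (l : List Int) (p a : Int) :
    l.foldl (fun h s => if s > h ∧ s ≠ p then s else h) a
      = (l.filter (fun s => !(s == p))).foldl max a := by
  induction l generalizing a with
  | nil => rfl
  | cons x t ih =>
    by_cases hx : x = p
    · simp [hx, ih]
    · simp only [List.foldl_cons, List.filter_cons, hx, ne_eq]
      by_cases h : x ≤ a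
      · simpa [hx, not_lt.mpr h, max_def, h] using ih (max a x)
      · simpa [hx, not_le.mp h, max_def, le_of_lt (not_le.mp h)] using ih (max a x)

-- B's final loop returns the head of the filtered list
theorem firstOtherThan_eq_headD (l : List Int) (p : Int) :
    firstOtherThan l p = (l.filter (fun s => !(s == p))).headD 0 := by
  induction l with
  | nil => rfl
  | cons x t ih =>
    by_cases hx : x = p
    · simp [firstOtherThan, hx, ih]
    · simp [firstOtherThan, hx]

-- head of a descending nonneg list is its max-fold
theorem headD_eq_fmax {l : List Int} (hs : l.Pairwise (fun a b => b ≤ a))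
    (h0 : ∀ x ∈ l, 0 ≤ x) : l.headD 0 = l.foldl max 0 := by
  cases l with
  | nil => rfl
  | cons x t =>
    simp only [List.headD_cons]
    have hx : ∀ y ∈ x :: t, y ≤ x := by
      intro y hy
      rcases List.mem_cons.mp hy with rfl | hy
      · exact le_rfl
      · exact (List.pairwise_cons.mp hs).1 y hy
    have hx0 : max 0 x = x := max_eq_right (h0 x (by simp))
    rw [List.foldl_cons, hx0]
    rcases foldl_max_spec t x with h | h
    · exact h.symm
    · exact (le_antisymm ((PySem.List.le_foldl_max t x).1) (hx _ (by simp [h])))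
-- firstAdjacentDup on a descending list: spec
theorem fad_spec (l : List Int) (hs : l.Pairwise (fun a b => b ≤ a)) :
    (∀ x ∈ l, 2 ≤ l.count x → x ≤ firstAdjacentDup l) ∧
    (firstAdjacentDup l = 0 ∨ (firstAdjacentDup l ∈ l ∧ 2 ≤ l.count (firstAdjacentDup l))) := by
  induction l with
  | nil => exact ⟨by simp, Or.inl rfl⟩
  | cons x t ih =>
    cases t with
    | nil =>
      refine ⟨?_, Or.inl rfl⟩
      intro z hz hcz
      simp only [List.mem_singleton] at hz
      subst hz
      simp at hcz
    | cons y r =>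
      have hpt : (y :: r).Pairwise (fun a b => b ≤ a) := (List.pairwise_cons.mp hs).2
      have hxy : y ≤ x := (List.pairwise_cons.mp hs).1 y (by simp)
      by_cases hxeq : x = y
      · -- firstAdjacentDup = x
        have hd : firstAdjacentDup (x :: y :: r) = x := by simp [firstAdjacentDup, hxeq]
        rw [hd]
        constructor
        · intro z hz _
          rcases List.mem_cons.mp hz with rfl | hz
          · exact le_rfl
          · exact (List.pairwise_cons.mp hs).1 z hz
        · refine Or.inr ⟨by simp, ?_⟩
          simp [hxeq]
      · have hd : firstAdjacentDup (x :: y :: r) = firstAdjacentDup (y :: r) := by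
          simp [firstAdjacentDup, hxeq]
        have hylt : y < x := lt_of_le_of_ne hxy (fun h => hxeq h.symm)
        have hxnot : x ∉ y :: r := by
          intro hmem
          have : x ≤ y := by
            rcases List.mem_cons.mp hmem with rfl | hm
            · exact le_rfl
            · exact (List.pairwise_cons.mp hpt).1 x hm
          omega
        have hcx : (x :: y :: r).count x = 1 := by
          simp [List.count_eq_zero.mpr hxnot]
        have hct : ∀ z ∈ y :: r, (x :: y :: r).count z = (y :: r).count z := by
          intro z hz
          have hzx : z ≠ x := fun h => hxnot (h ▸ hz)
          simp [List.count_cons, Ne.symm hzx]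
        rw [hd]
        obtain ⟨ih1, ih2⟩ := ih hpt
        constructor
        · intro z hz hcz
          rcases List.mem_cons.mp hz with rfl | hz
          · rw [hcx] at hcz; omega
          · exact ih1 z hz (by rw [← hct z hz]; exact hcz)
        · rcases ih2 with h | ⟨hm, hc⟩
          · exact Or.inl h
          · exact Or.inr ⟨by simp [List.mem_cons.mpr (Or.inr hm)], by rw [hct _ hm]; exact hc⟩
-- counterMinusSet: items and keys
theorem items_cms (hv : List String) :
    (counterMinusSet hv).items =
      ((PySem.Set.ofList hv).filter (fun c => decide (0 < (hv.count c : Int) - 1))).map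
        (fun c => (c, (hv.count c : Int) - 1)) := by
  show (((PySem.Dict.counter hv).items.filter _).map _) = _
  rw [PySem.Dict.items_counter, List.filter_map]
  simp [List.map_map, Function.comp_def]

theorem keys_cms (hv : List String) :
    (counterMinusSet hv).keys =
      (PySem.Set.ofList hv).filter (fun c => decide (0 < (hv.count c : Int) - 1)) := by
  show (counterMinusSet hv).items.map _ = _
  rw [items_cms]
  simp [List.map_map, Function.comp_def]

theorem nodup_keys_cms (hv : List String) : (counterMinusSet hv).keys.Nodup := by
  rw [keys_cms]
  exact (PySem.Set.nodup_ofList hv).filter _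

theorem mem_keys_cms {hv : List String} {c : String} :
    c ∈ (counterMinusSet hv).keys ↔ c ∈ hv ∧ 2 ≤ hv.count c := by
  rw [keys_cms, List.mem_filter, PySem.Set.mem_ofList]
  constructor
  · rintro ⟨h1, h2⟩; simp only [decide_eq_true_eq] at h2; exact ⟨h1, by omega⟩
  · rintro ⟨h1, h2⟩; refine ⟨h1, by simp only [decide_eq_true_eq]; omega⟩

theorem getD_cms {hv : List String} {c : String} (h : c ∈ (counterMinusSet hv).keys) :
    (counterMinusSet hv).getD c 0 = (hv.count c : Int) - 1 := by
  apply PySem.Dict.getD_of_mem_items _ _ (nodup_keys_cms hv)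
  have := h
  rw [keys_cms] at this
  rw [items_cms]
  exact List.mem_map.mpr ⟨c, this, rfl⟩
-- guard equivalences under Pre_
theorem nop_ne_zero {hv : List String} (hp : ∃ c ∈ hv, hv.count c = 2) :
    number_of_pairs hv ≠ 0 := by
  obtain ⟨c, hc, hcc⟩ := hp
  show (counterMinusSet hv).keys.foldl _ 0 ≠ 0
  rw [PySem.List.foldl_congr_mem _ _
      (fun pairs i => if decide ((counterMinusSet hv).getD i 0 = 1) = true then pairs + 1 else pairs) 0
      (by intro acc x hx; simp)]
  rw [PySem.List.foldl_count_if]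
  have hck : c ∈ (counterMinusSet hv).keys := mem_keys_cms.mpr ⟨hc, by omega⟩
  have : 0 < (counterMinusSet hv).keys.countP (fun i => decide ((counterMinusSet hv).getD i 0 = 1)) := by
    exact List.countP_pos_iff.mpr ⟨c, hck, by simp [getD_cms hck, hcc]⟩
  omega

theorem b_guard {hv : List String} (hp : ∃ c ∈ hv, hv.count c = 2) :
    ((PySem.Dict.counter hv).values.contains (2 : Int)) = true := by
  obtain ⟨c, hc, hcc⟩ := hp
  have : (2 : Int) ∈ (PySem.Dict.counter hv).values := by
    show (2:Int) ∈ (PySem.Dict.counter hv).items.map _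
    rw [PySem.Dict.items_counter]
    simp only [List.map_map]
    exact List.mem_map.mpr ⟨c, (PySem.Set.mem_ofList hv c).mpr hc, by simp [hcc]⟩
  exact List.elem_eq_true_of_mem this
-- ===== VERDICT (by name: the statement is the Claim_ definition above) =====
theorem value_of_highest_card_outside_of_pair_spec : Claim_equal_value_of_highest_card_outside_of_pair := by
  intro hv _ hpre
  obtain ⟨hvalid, hp⟩ := hpre
  unfold Spec_value_of_highest_card_outside_of_pair
  -- abbreviations
  set sc : String → Int := fun c => CARD_TO_SCORE.getD c 0 with hsc
  have hval1 : ∀ x ∈ hv.map sc, (1:Int) ≤ x := by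
    intro x hx
    obtain ⟨c, hc, rfl⟩ := List.mem_map.mp hx
    exact cts_score_pos c (cts_mem_keys_of_contains (hvalid c hc))
  set ss : List Int := PySem.List.sorted (hv.map sc) (fun s => s) true with hss
  have hmem_ss : ∀ x, x ∈ ss ↔ x ∈ hv.map sc := fun x => PySem.List.mem_sorted _ _ _ x
  have hsorted : ss.Pairwise (fun a b => b ≤ a) := PySem.List.sorted_pairwise_rev _ _
  have hcount_ss : ∀ x, ss.count x = (hv.map sc).count x :=
    fun x => (PySem.List.sorted_perm (hv.map sc) (fun s => s) true).count_eq x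
  -- pair values agree
  have hApair : highest_value_in_pair hv = ((counterMinusSet hv).keys.map sc).foldl max 0 := by
    unfold highest_value_in_pair
    rw [if_neg (nop_ne_zero hp)]
    exact foldl_if_gt _ 0
  have hpair_eq : highest_value_in_pair hv = firstAdjacentDup ss := by
    rw [hApair]
    obtain ⟨fad1, fad2⟩ := fad_spec ss hsorted
    apply le_antisymm
    · rcases foldl_max_spec ((counterMinusSet hv).keys.map sc) 0 with h0 | hm
      · rw [h0]
        rcases fad2 with h | ⟨hmem, _⟩
        · omega
        · have := hval1 _ ((hmem_ss _).mp hmem); omega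
      · obtain ⟨c, hck, hxc⟩ := List.mem_map.mp hm
        obtain ⟨hchv, hc2⟩ := mem_keys_cms.mp hck
        rw [← hxc]
        apply fad1
        · exact (hmem_ss _).mpr (List.mem_map.mpr ⟨c, hchv, rfl⟩)
        · rw [hcount_ss, count_map_score hv hvalid (hvalid c hchv)]; exact hc2
    · rcases fad2 with h | ⟨hmem, hc2⟩
      · rw [h]; exact fmax_nonneg _
      · obtain ⟨c, hchv, hxc⟩ := List.mem_map.mp ((hmem_ss _).mp hmem)
        rw [← hxc] at hc2 ⊢
        rw [hcount_ss, count_map_score hv hvalid (hvalid c hchv)] at hc2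
        exact (PySem.List.le_foldl_max _ 0).2 _
          (List.mem_map.mpr ⟨c, mem_keys_cms.mpr ⟨hchv, hc2⟩, rfl⟩)
  -- both sides as a max-fold over the filtered scores
  set P : Int := firstAdjacentDup ss with hP
  have hA : value_of_highest_card_outside_of_pair hv
      = ((hv.map sc).filter (fun s => !(s == P))).foldl max 0 := by
    have hdef : value_of_highest_card_outside_of_pair hv
        = hv.foldl (fun h card =>
            if sc card > h ∧ sc card ≠ highest_value_in_pair hv
            then sc card else h) 0 := rfl
    rw [hdef, hpair_eq,
      show (hv.foldl (fun h card => if sc card > h ∧ sc card ≠ P then sc card else h) 0)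
        = ((hv.map sc).foldl (fun h s => if s > h ∧ s ≠ P then s else h) 0) from
        (List.foldl_map (f := sc) (g := fun h s => if s > h ∧ s ≠ P then s else h)).symm]
    exact foldl_if_ne _ P 0
  have hB : value_of_highest_card_outside_of_pair_alt hv
      = (ss.filter (fun s => !(s == P))).foldl max 0 := by
    have hdef : value_of_highest_card_outside_of_pair_alt hv
        = (if ¬ ((PySem.Dict.counter hv).values.contains (2 : Int)) then 0
           else firstOtherThan ss (firstAdjacentDup ss)) := rfl
    rw [hdef, if_neg (by rw [b_guard hp]; simp), ← hP, firstOtherThan_eq_headD]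
    apply headD_eq_fmax
    · exact hsorted.sublist List.filter_sublist
    · intro x hx
      have := hval1 _ ((hmem_ss x).mp (List.mem_filter.mp hx).1)
      omega
  rw [hA, hB]
  apply fmax_congr
  intro x
  simp only [List.mem_filter, hmem_ss]
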